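-- pv_equiv track=rewrite | github.com/queelius/computational-explorations | src/kelley_meka_schur.py | greedy_sum_free_coloring
-- ===== SOURCE A (Python) =====
-- from typing import List, Set, Tuple, Optional
--
-- def greedy_sum_free_coloring(N: int, k: int) -> List[int]:
--     """
--     Greedily construct a k-coloring of {1,...,N} trying to avoid Schur triples.
--
--     Uses the standard convention [1..N] (not 0-indexed) to match Schur number
--     definitions where S(k) is the largest N such that [N] can be k-colored sum-free.
--
--     This helps find upper bounds on S(k).
--     """
--     coloring = [-1] * (N + 1)  # 1-indexed: coloring[1..N]
--     colors = [set() for _ in range(k)]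
--
--     for x in range(1, N + 1):
--         # Try to find a color that doesn't create Schur triple
--         placed = False
--         for c in range(k):
--             # Check if adding x to color c creates Schur triple
--             creates_schur = False
--             for a in colors[c]:
--                 # a + x = b (where b already in colors[c])
--                 if a + x in colors[c]:
--                     creates_schur = True
--                     break
--                 # a + b = x (where a, b already in colors[c])
--                 if x - a in colors[c] and x - a > 0:
--                     creates_schur = True
--                     break
--
--             if not creates_schur:
--                 coloring[x] = c
--                 colors[c].add(x)
--                 placed = True
--                 break
--
--         if not placed:
--             # Force into first color (will create Schur)
--             coloring[x] = 0
--             colors[0].add(x)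
--
--     return coloring[1:]  # Return 0-indexed list for compatibility
-- ===== SOURCE B (Python) =====
-- from typing import List
--
-- def greedy_sum_free_coloring(N: int, k: int) -> List[int]:
--     """Greedy k-coloring of [1..N] avoiding Schur triples, via per-color sumsets.
--
--     Since x is placed in increasing order, every element already in a color is
--     smaller than x, so the only way x can complete a Schur triple in color c is
--     x = a + b with a, b already in c.  We therefore keep, per color, the set of
--     all pairwise sums of its members; feasibility of a color is one membership
--     test, and sums are extended only once, at placement.
--     """
--     out = []
--     members = [[] for _ in range(k)]
--     sums = [set() for _ in range(k)]
--     for x in range(1, N + 1):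
--         c = next((c for c in range(k) if x not in sums[c]), 0)
--         out.append(c)
--         s = sums[c]
--         for a in members[c]:
--             s.add(a + x)
--         s.add(2 * x)
--         members[c].append(x)
--     return out
-- ===== Notes on version B (the rewrite author's own statement) =====
-- stated objective: alternative
-- what changed: B replaces A's per-colour scan over members testing pairs (a+x in set, x-a in set) by a per-colour sumset maintained incrementally at placement: feasibility of a colour is one membership test x in sums[c] (elements are placed in increasing order, so the a+x=b branch of A can never fire), and the output list is built directly instead of writing into a preallocated 1-indexed array.
-- outside the precondition, e.g. on greedy_sum_free_coloring(3, 0): A raises IndexError, B raises IndexError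
import Mathlib
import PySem

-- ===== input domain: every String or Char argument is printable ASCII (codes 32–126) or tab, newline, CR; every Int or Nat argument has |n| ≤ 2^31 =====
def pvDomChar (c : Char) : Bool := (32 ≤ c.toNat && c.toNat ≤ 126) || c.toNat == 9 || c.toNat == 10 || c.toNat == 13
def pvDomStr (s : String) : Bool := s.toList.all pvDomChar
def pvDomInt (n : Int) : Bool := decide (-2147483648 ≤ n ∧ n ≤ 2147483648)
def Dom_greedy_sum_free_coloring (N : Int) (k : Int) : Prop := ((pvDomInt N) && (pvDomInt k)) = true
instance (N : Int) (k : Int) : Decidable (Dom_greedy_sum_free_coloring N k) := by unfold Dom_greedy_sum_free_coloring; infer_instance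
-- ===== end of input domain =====

-- B replaces A's per-colour pair scan by a per-colour sumset maintained once at placement
-- (elements arrive in increasing order, so only x = a + b can close a triple); objective: alternative.

-- ===== PORT A =====
-- 'for a in colors[c]: … break' computes an order-independent existence check, ported as List.any.
def pvAcreates (x : Int) (s : PySem.Set Int) : Bool :=
  s.any (fun a => PySem.Set.contains s (a + x) || (PySem.Set.contains s (x - a) && decide (x - a > 0)))

-- the 'for c in range(k): … break' loop: first colour whose check passes
def pvApick (x : Int) (colors : List (PySem.Set Int)) : List Int → Option Int
  | [] => none
  | c :: cs =>
      if pvAcreates x (PySem.List.pyGetD colors c []) then pvApick x colors cs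
      else some c

def pvAstep (k : Int) (st : List Int × List (PySem.Set Int)) (x : Int) :
    List Int × List (PySem.Set Int) :=
  match pvApick x st.2 (PySem.List.pyRange 0 k 1) with
  | some c =>  -- coloring[x] = c; colors[c].add(x)  (indices in range on Pre_)
      (PySem.List.pySetD st.1 x c,
       PySem.List.pySetD st.2 c (PySem.Set.add (PySem.List.pyGetD st.2 c []) x))
  | none =>    -- not placed: force into colour 0
      (PySem.List.pySetD st.1 x 0,
       PySem.List.pySetD st.2 0 (PySem.Set.add (PySem.List.pyGetD st.2 0 []) x))

def greedy_sum_free_coloring (N : Int) (k : Int) : List Int :=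
  let coloring : List Int := List.replicate (N + 1).toNat (-1)
  let colors : List (PySem.Set Int) := (PySem.List.pyRange 0 k 1).map (fun _ => PySem.Set.empty)
  let st := (PySem.List.pyRange 1 (N + 1) 1).foldl (pvAstep k) (coloring, colors)
  PySem.List.slice st.1 (some 1) none

-- ===== PORT B =====
def pvBstep (k : Int) (st : List Int × List (List Int) × List (PySem.Set Int)) (x : Int) :
    List Int × List (List Int) × List (PySem.Set Int) :=
  let c := ((PySem.List.pyRange 0 k 1).find?
              (fun c => !(PySem.Set.contains (PySem.List.pyGetD st.2.2 c []) x))).getD 0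
  let s := (PySem.List.pyGetD st.2.1 c []).foldl (fun s a => PySem.Set.add s (a + x))
              (PySem.List.pyGetD st.2.2 c [])
  let s := PySem.Set.add s (2 * x)
  (st.1 ++ [c],
   PySem.List.pySetD st.2.1 c (PySem.List.pyGetD st.2.1 c [] ++ [x]),
   PySem.List.pySetD st.2.2 c s)

def greedy_sum_free_coloring_alt (N : Int) (k : Int) : List Int :=
  let members : List (List Int) := (PySem.List.pyRange 0 k 1).map (fun _ => [])
  let sums : List (PySem.Set Int) := (PySem.List.pyRange 0 k 1).map (fun _ => PySem.Set.empty)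
  let st := (PySem.List.pyRange 1 (N + 1) 1).foldl (pvBstep k) ([], members, sums)
  st.1

-- ===== PRECONDITION & SPEC =====
-- Pre_ excludes k ≤ 0 with N ≥ 1: there A raises IndexError on colors[0] (and so does B).
def Pre_greedy_sum_free_coloring (N : Int) (k : Int) : Prop := N ≤ 0 ∨ 1 ≤ k
instance (N : Int) (k : Int) : Decidable (Pre_greedy_sum_free_coloring N k) := by
  unfold Pre_greedy_sum_free_coloring; infer_instance
def pvWitness_greedy_sum_free_coloring : Int × Int := (8, 2)

def Spec_greedy_sum_free_coloring (N : Int) (k : Int) (out : List Int) : Prop :=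
  out = greedy_sum_free_coloring_alt N k
instance (N : Int) (k : Int) (out : List Int) : Decidable (Spec_greedy_sum_free_coloring N k out) := by
  unfold Spec_greedy_sum_free_coloring; infer_instance

-- ===== CLAIM (what is proved, stated in full; the proofs are below) =====
def Claim_equal_greedy_sum_free_coloring : Prop :=
  ∀ (N : Int) (k : Int), Dom_greedy_sum_free_coloring N k →
    Pre_greedy_sum_free_coloring N k →
    Spec_greedy_sum_free_coloring N k (greedy_sum_free_coloring N k)

-- ===== LEMMAS AND PROOFS =====

-- per colour: under the invariant (members in [1, x), sums = the pairwise sums of members),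
-- A's Schur check equals B's sumset membership test
lemma pv_creates_eq (x : Int) (m : List Int) (ss : PySem.Set Int)
    (hpos : ∀ a ∈ m, 1 ≤ a ∧ a < x)
    (hs : ∀ z : Int, z ∈ ss ↔ ∃ a ∈ m, ∃ b ∈ m, z = a + b) :
    pvAcreates x m = PySem.Set.contains ss x := by
  apply Bool.eq_iff_iff.mpr
  simp only [pvAcreates, List.any_eq_true, PySem.Set.contains_iff, Bool.or_eq_true,
    Bool.and_eq_true, decide_eq_true_eq]
  constructor
  · rintro ⟨a, ha, h | ⟨h1, _⟩⟩
    · have ha' := hpos a ha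
      have hax := hpos _ h
      omega
    · rw [hs]
      exact ⟨a, ha, x - a, h1, by ring⟩
  · intro h
    rw [hs] at h
    obtain ⟨a, ha, b, hb, hab⟩ := h
    refine ⟨a, ha, Or.inr ⟨?_, ?_⟩⟩
    · have : x - a = b := by omega
      rw [this]; exact hb
    · have := hpos b hb; omega

-- A's pick loop is B's find? once the per-colour checks agree
lemma pv_pick_eq (x : Int) (colors : List (PySem.Set Int)) (sums : List (PySem.Set Int))
    (cs : List Int)
    (h : ∀ c ∈ cs, pvAcreates x (PySem.List.pyGetD colors c []) =
                   PySem.Set.contains (PySem.List.pyGetD sums c []) x) :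
    pvApick x colors cs =
      cs.find? (fun c => !(PySem.Set.contains (PySem.List.pyGetD sums c []) x)) := by
  induction cs with
  | nil => rfl
  | cons c cs ih =>
    have hc := h c (List.mem_cons_self ..)
    simp only [pvApick, List.find?_cons]
    rw [hc]
    cases hcc : PySem.Set.contains (PySem.List.pyGetD sums c []) x with
    | true =>
      simp only [Bool.not_true]
      exact ih (fun c hc' => h c (List.mem_cons_of_mem _ hc'))
    | false => simp

lemma pv_set_mid (out rest : List Int) (c : Int) :
    ((-1 : Int) :: (out ++ (-1 : Int) :: rest)).set (out.length + 1) c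
      = (-1 : Int) :: ((out ++ [c]) ++ rest) := by
  simp only [List.set_cons_succ]
  rw [List.set_append_right _ _ (le_refl _)]
  simp

lemma pv_getD_set {α : Type} (l : List α) (j : Nat) (v d : α) (hj : j < l.length) (i : Nat) :
    (l.set j v).getD i d = if i = j then v else l.getD i d := by
  by_cases h : i = j
  · subst h
    simp [List.getD_eq_getElem?_getD, hj]
  · rw [if_neg h, List.getD_eq_getElem?_getD, List.getD_eq_getElem?_getD, List.getElem?_set,
        if_neg (fun hh => h hh.symm)]

-- pyGetD with a nonnegative Int index is List.getD at .toNat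
lemma pv_getD_bridge {α : Type} (xs : List α) (c : Int) (d : α) (h0 : 0 ≤ c) :
    PySem.List.pyGetD xs c d = xs.getD c.toNat d := by
  have hc : ((c.toNat : Nat) : Int) = c := by omega
  have h := PySem.List.pyGetD_natCast xs c.toNat d
  rwa [hc] at h

-- main induction: the two folds stay related step for step
lemma pv_main (k : Int) (hk : 1 ≤ k) :
    ∀ (n : Nat) (x : Int), 1 ≤ x →
    ∀ (out : List Int) (members : List (List Int)) (sums : List (PySem.Set Int)),
      members.length = k.toNat → sums.length = k.toNat →
      x = 1 + (out.length : Int) →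
      (∀ i : Nat, ∀ a ∈ members.getD i [], 1 ≤ a ∧ a < x) →
      (∀ i : Nat, ∀ z : Int, z ∈ sums.getD i [] ↔
          ∃ a ∈ members.getD i [], ∃ b ∈ members.getD i [], z = a + b) →
      ((PySem.List.pyRange x (x + n) 1).foldl (pvAstep k)
          ((-1 : Int) :: (out ++ List.replicate n (-1)), members)).1
        = (-1 : Int) :: ((PySem.List.pyRange x (x + n) 1).foldl (pvBstep k) (out, members, sums)).1 := by
  intro n
  induction n with
  | zero =>
    intro x hx out members sums _ _ _ _ _
    rw [PySem.List.pyRange_one_eq_nil (by omega)]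
    simp
  | succ n ih =>
    intro x hx out members sums hlm hls hxo hpos hsum
    have hb : x + ((n + 1 : Nat) : Int) = (x + 1) + (n : Int) := by push_cast; ring
    rw [hb, PySem.List.pyRange_one_cons (by omega)]
    simp only [List.foldl_cons]
    -- per-colour agreement for every colour in range(k)
    have hagree : ∀ c ∈ PySem.List.pyRange 0 k 1,
        pvAcreates x (PySem.List.pyGetD members c []) =
        PySem.Set.contains (PySem.List.pyGetD sums c []) x := by
      intro c hc
      rw [PySem.List.mem_pyRange_one] at hc
      rw [pv_getD_bridge members c [] hc.1, pv_getD_bridge sums c [] hc.1]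
      exact pv_creates_eq x _ _ (hpos c.toNat) (hsum c.toNat)
    have hpick := pv_pick_eq x members sums (PySem.List.pyRange 0 k 1) hagree
    set p : Int → Bool := fun c => !(PySem.Set.contains (PySem.List.pyGetD sums c []) x) with hp
    set cstar : Int := ((PySem.List.pyRange 0 k 1).find? p).getD 0 with hcs
    have hcb : 0 ≤ cstar ∧ cstar < k := by
      cases hfind : (PySem.List.pyRange 0 k 1).find? p with
      | none => rw [hcs, hfind]; simp; omega
      | some c =>
        have hmem := List.mem_of_find?_eq_some hfind
        rw [PySem.List.mem_pyRange_one] at hmem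
        rw [hcs, hfind]; simpa using hmem
    have hmx : x.toNat = out.length + 1 := by omega
    have hgm : PySem.List.pyGetD members cstar [] = members.getD cstar.toNat [] :=
      pv_getD_bridge members cstar [] hcb.1
    have hgs : PySem.List.pyGetD sums cstar [] = sums.getD cstar.toNat [] :=
      pv_getD_bridge sums cstar [] hcb.1
    have hxnotmem : x ∉ members.getD cstar.toNat [] := fun hmem =>
      absurd (hpos cstar.toNat x hmem).2 (by omega)
    set members' : List (List Int) :=
      members.set cstar.toNat (members.getD cstar.toNat [] ++ [x]) with hm'
    set s' : PySem.Set Int :=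
      PySem.Set.add ((members.getD cstar.toNat []).foldl (fun s a => PySem.Set.add s (a + x))
        (sums.getD cstar.toNat [])) (2 * x) with hs'
    set sums' : List (PySem.Set Int) := sums.set cstar.toNat s' with hsu'
    have hstepB : pvBstep k (out, members, sums) x = (out ++ [cstar], members', sums') := by
      simp only [pvBstep]
      rw [← hp, ← hcs, hgm, hgs]
      rw [PySem.List.pySetD_of_nonneg _ _ hcb.1, PySem.List.pySetD_of_nonneg _ _ hcb.1]
    have hstepA0 : pvAstep k ((-1 : Int) :: (out ++ List.replicate (n + 1) (-1)), members) x =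
        (PySem.List.pySetD ((-1 : Int) :: (out ++ List.replicate (n + 1) (-1))) x cstar,
         PySem.List.pySetD members cstar
           (PySem.Set.add (PySem.List.pyGetD members cstar []) x)) := by
      simp only [pvAstep, hpick]
      cases hfind : (PySem.List.pyRange 0 k 1).find? p with
      | none => rw [hcs, hfind]; rfl
      | some c => rw [hcs, hfind]; rfl
    have hcolA : PySem.List.pySetD ((-1 : Int) :: (out ++ List.replicate (n + 1) (-1))) x cstar
        = (-1 : Int) :: ((out ++ [cstar]) ++ List.replicate n (-1)) := by
      rw [PySem.List.pySetD_of_nonneg _ _ (by omega : (0 : Int) ≤ x)]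
      rw [List.replicate_succ, hmx]
      exact pv_set_mid out (List.replicate n (-1)) cstar
    have hmemA : PySem.List.pySetD members cstar
          (PySem.Set.add (PySem.List.pyGetD members cstar []) x) = members' := by
      rw [PySem.List.pySetD_of_nonneg _ _ hcb.1, hgm, PySem.Set.add_of_not_mem hxnotmem, hm']
    have hstepA : pvAstep k ((-1 : Int) :: (out ++ List.replicate (n + 1) (-1)), members) x =
        ((-1 : Int) :: ((out ++ [cstar]) ++ List.replicate n (-1)), members') := by
      rw [hstepA0, hcolA, hmemA]
    rw [hstepA, hstepB]
    have hcl : cstar.toNat < members.length := by omega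
    have hcls : cstar.toNat < sums.length := by omega
    refine ih (x + 1) (by omega) (out ++ [cstar]) members' sums' ?_ ?_ ?_ ?_ ?_
    · rw [hm', List.length_set, hlm]
    · rw [hsu', List.length_set, hls]
    · simp; omega
    · intro i a ha
      rw [hm', pv_getD_set members cstar.toNat _ [] hcl i] at ha
      by_cases hi : i = cstar.toNat
      · rw [if_pos hi] at ha
        rcases List.mem_append.mp ha with ha | ha
        · have := hpos cstar.toNat a ha
          omega
        · have : a = x := List.mem_singleton.mp ha
          omega
      · rw [if_neg hi] at ha
        have := hpos i a ha
        omega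
    · intro i z
      rw [hm', pv_getD_set members cstar.toNat _ [] hcl i,
          hsu', pv_getD_set sums cstar.toNat _ [] hcls i]
      by_cases hi : i = cstar.toNat
      · rw [if_pos hi, if_pos hi, hs']
        simp only [PySem.Set.mem_add, PySem.Set.mem_foldl_add, hsum cstar.toNat]
        constructor
        · rintro ((⟨a, ha, b, hb, rfl⟩ | ⟨a, ha, rfl⟩) | rfl)
          · exact ⟨a, List.mem_append_left _ ha, b, List.mem_append_left _ hb, rfl⟩
          · exact ⟨a, List.mem_append_left _ ha, x,
              List.mem_append_right _ (List.mem_singleton.mpr rfl), rfl⟩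
          · exact ⟨x, List.mem_append_right _ (List.mem_singleton.mpr rfl), x,
              List.mem_append_right _ (List.mem_singleton.mpr rfl), by ring⟩
        · rintro ⟨a, ha, b, hb, rfl⟩
          rcases List.mem_append.mp ha with ha' | ha' <;>
            rcases List.mem_append.mp hb with hb' | hb'
          · exact Or.inl (Or.inl ⟨a, ha', b, hb', rfl⟩)
          · have hbx : b = x := List.mem_singleton.mp hb'
            exact Or.inl (Or.inr ⟨a, ha', by rw [hbx]⟩)
          · have hax : a = x := List.mem_singleton.mp ha'
            exact Or.inl (Or.inr ⟨b, hb', by rw [hax]; ring⟩)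
          · have h1 : a = x := List.mem_singleton.mp ha'
            have h2 : b = x := List.mem_singleton.mp hb'
            exact Or.inr (by rw [h1, h2]; ring)
      · rw [if_neg hi, if_neg hi]
        exact hsum i z

lemma pv_getD_replicate (n i : Nat) (d : List Int) :
    (List.replicate n d).getD i d = d := by
  by_cases h : i < n
  · rw [List.getD_eq_getElem _ _ (by simpa using h), List.getElem_replicate]
  · rw [List.getD_eq_default _ _ (by simpa using h)]

-- ===== VERDICT (by name: the statement is the Claim_ definition above) =====
theorem greedy_sum_free_coloring_spec : Claim_equal_greedy_sum_free_coloring := by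
  intro N k _ hpre
  unfold Spec_greedy_sum_free_coloring
  simp only [greedy_sum_free_coloring, greedy_sum_free_coloring_alt]
  by_cases hN : N ≤ 0
  · rw [PySem.List.pyRange_one_eq_nil (by omega : N + 1 ≤ 1)]
    simp only [List.foldl_nil]
    rw [PySem.List.slice_from_one, List.tail_replicate]
    have h1 : (N + 1).toNat - 1 = 0 := by omega
    rw [h1, List.replicate_zero]
  · have hk : 1 ≤ k := hpre.resolve_left hN
    have hmap : (PySem.List.pyRange 0 k 1).map (fun _ => (PySem.Set.empty : PySem.Set Int))
        = List.replicate k.toNat [] := by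
      rw [List.map_const']
      simp [PySem.List.length_pyRange_one, PySem.Set.empty]
    have hmap2 : (PySem.List.pyRange 0 k 1).map (fun _ => ([] : List Int))
        = List.replicate k.toNat [] := by
      rw [List.map_const']
      simp [PySem.List.length_pyRange_one]
    have hrep : List.replicate (N + 1).toNat (-1 : Int)
        = (-1 : Int) :: (([] : List Int) ++ List.replicate N.toNat (-1)) := by
      have h2 : (N + 1).toNat = N.toNat + 1 := by omega
      rw [h2, List.replicate_succ, List.nil_append]
    have hb : (N + 1 : Int) = 1 + (N.toNat : Int) := by omega
    have hmain := pv_main k hk N.toNat 1 (by norm_num) [] (List.replicate k.toNat [])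
      (List.replicate k.toNat []) (by simp) (by simp) (by simp)
      (by intro i a ha; rw [pv_getD_replicate] at ha; simp at ha)
      (by intro i z
          rw [pv_getD_replicate]
          simp)
    rw [hmap, hmap2, hrep, hb]
    rw [hmain, PySem.List.slice_from_one, List.tail_cons]
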